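-- pv_equiv track=rewrite | github.com/graceidea/pytorch3dSurfaceMesh2Volume | tools/fixOrientation.py | count_bad_orientations
-- ===== SOURCE A (Python) =====
-- def count_bad_orientations(vertices, triangles):
--     num_bad_orientations = 0
--
--     # Build an edge list
--     edges = set()
--     for triangle in triangles:
--         for i in range(3):
--             edge = (triangle[i], triangle[(i + 1) % 3])
--             edges.add(tuple(sorted(edge)))
--
--     # Count non-manifold edges
--     for edge in edges:
--         shared_triangles = [t for t in triangles if edge[0] in t and edge[1] in t]
--         if len(shared_triangles) != 2:
--             num_bad_orientations += 1
--
--     return num_bad_orientations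
-- ===== SOURCE B (Python) =====
-- def _tri_edges(t):
--     a, b, c = t[0], t[1], t[2]
--     return [(a, b) if a <= b else (b, a),
--             (b, c) if b <= c else (c, b),
--             (c, a) if c <= a else (a, c)]
--
--
-- def count_bad_orientations(vertices, triangles):
--     # vertex value -> list of indices of the triangles containing it
--     incidence = {}
--     for idx, t in enumerate(triangles):
--         for v in set(t):
--             incidence.setdefault(v, []).append(idx)
--     edge_list = []
--     for t in triangles:
--         edge_list.extend(_tri_edges(t))
--     bad = 0
--     for a, b in set(edge_list):
--         if len(set(incidence[a]) & set(incidence[b])) != 2: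
--             bad += 1
--     return bad
-- ===== Notes on version B (the rewrite author's own statement) =====
-- stated objective: faster
-- what changed: B builds a vertex-to-triangle-index incidence map in one pass and judges each distinct edge by intersecting the two index lists of its endpoints, instead of rescanning the whole triangle list for every edge; edges come from destructuring each triangle's first three entries rather than indexing with (i+1)%3.
import Mathlib
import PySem

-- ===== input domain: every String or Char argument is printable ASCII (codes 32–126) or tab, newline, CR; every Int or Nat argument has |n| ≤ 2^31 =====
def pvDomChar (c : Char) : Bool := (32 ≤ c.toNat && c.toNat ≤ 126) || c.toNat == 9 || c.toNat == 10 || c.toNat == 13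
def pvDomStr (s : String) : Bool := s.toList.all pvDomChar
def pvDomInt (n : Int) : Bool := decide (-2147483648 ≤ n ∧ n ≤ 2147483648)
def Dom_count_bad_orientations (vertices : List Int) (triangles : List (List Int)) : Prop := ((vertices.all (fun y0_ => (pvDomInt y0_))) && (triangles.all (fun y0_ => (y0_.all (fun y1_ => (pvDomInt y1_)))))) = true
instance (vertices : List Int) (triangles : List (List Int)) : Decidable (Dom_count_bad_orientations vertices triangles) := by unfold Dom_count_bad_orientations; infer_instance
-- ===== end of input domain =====

-- B replaces A's per-edge rescan of the triangle list by a vertex-to-triangle-index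
-- incidence map built in one pass; each distinct edge is judged by intersecting the two
-- index lists of its endpoints (faster).

-- ===== PORT A =====
-- edge = tuple(sorted((triangle[i], triangle[(i+1)%3]))); pyGet? is none on IndexError
-- (excluded by Pre_, .getD 0 is never used there); sorted on a 2-element int tuple is
-- written out exactly as its min/max pair.
def pvEdgeA (t : List Int) (i : Int) : Int × Int :=
  let a := (PySem.List.pyGet? t i).getD 0
  let b := (PySem.List.pyGet? t (PySem.Int.mod (i + 1) 3)).getD 0
  if a ≤ b then (a, b) else (b, a)

def count_bad_orientations (vertices : List Int) (triangles : List (List Int)) : Int :=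
  let edges : PySem.Set (Int × Int) :=
    triangles.foldl (fun es t =>
      (PySem.List.pyRange 0 3 1).foldl (fun es i => PySem.Set.add es (pvEdgeA t i)) es) []
  -- iterating the Python set: the count below is independent of iteration order
  edges.foldl (fun n e =>
    let shared := triangles.filter (fun t => t.contains e.1 && t.contains e.2)
    if (shared.length : Int) ≠ 2 then n + 1 else n) 0

-- ===== PORT B =====
-- _tri_edges(t): a, b, c = t[0], t[1], t[2] — Python raises IndexError on a shorter
-- triangle (outside Pre_); the port contributes nothing there.
def pvTriEdges : List Int → List (Int × Int)
  | a :: b :: c :: _ =>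
      [if a ≤ b then (a, b) else (b, a),
       if b ≤ c then (b, c) else (c, b),
       if c ≤ a then (c, a) else (a, c)]
  | _ => []

def count_bad_orientations_alt (vertices : List Int) (triangles : List (List Int)) : Int :=
  -- incidence.setdefault(v, []).append(idx) over set(t) is Dict.modify v [] (· ++ [idx])
  let incidence : PySem.Dict Int (List Int) :=
    (PySem.List.enumerate triangles 0).foldl (fun d p =>
      (PySem.Set.ofList p.2).foldl (fun d v => d.modify v [] (fun l => l ++ [p.1])) d)
      PySem.Dict.empty
  let edgeList := triangles.foldl (fun es t => es ++ pvTriEdges t) []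
  -- incidence[a] is present for every edge endpoint inside Pre_; getD [] is never used there
  (PySem.Set.ofList edgeList).foldl (fun n e =>
    if (PySem.Set.len (PySem.Set.inter
          (PySem.Set.ofList (incidence.getD e.1 []))
          (PySem.Set.ofList (incidence.getD e.2 []))) : Int) ≠ 2 then n + 1 else n) 0

-- ===== PRECONDITION & SPEC =====
-- Pre_ excludes exactly the inputs where Python A raises IndexError: a triangle with fewer
-- than 3 entries (triangle[i] for i in range(3)).
def Pre_count_bad_orientations (vertices : List Int) (triangles : List (List Int)) : Prop :=
  ∀ t ∈ triangles, 3 ≤ t.length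
instance (vertices : List Int) (triangles : List (List Int)) : Decidable (Pre_count_bad_orientations vertices triangles) := by unfold Pre_count_bad_orientations; infer_instance

def pvWitness_count_bad_orientations : List Int × List (List Int) :=
  ([0, 1, 2, 3], [[0, 1, 2], [0, 1, 3]])

def Spec_count_bad_orientations (vertices : List Int) (triangles : List (List Int)) (out : Int) : Prop := out = count_bad_orientations_alt vertices triangles
instance (vertices : List Int) (triangles : List (List Int)) (out : Int) : Decidable (Spec_count_bad_orientations vertices triangles out) := by unfold Spec_count_bad_orientations; infer_instance

-- ===== CLAIM (what is proved, stated in full; the proofs are below) =====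
def Claim_equal_count_bad_orientations : Prop := ∀ (vertices : List Int) (triangles : List (List Int)), Dom_count_bad_orientations vertices triangles → Pre_count_bad_orientations vertices triangles → Spec_count_bad_orientations vertices triangles (count_bad_orientations vertices triangles)

-- ===== LEMMAS AND PROOFS =====

-- inner vertex loop of B: every key of the duplicate-free list gains index i
theorem pvInnerInc (S : List Int) (i : Int) :
    ∀ (d : PySem.Dict Int (List Int)) (w : Int), S.Nodup →
      (S.foldl (fun d v => d.modify v [] (fun l => l ++ [i])) d).getD w []
        = if w ∈ S then d.getD w [] ++ [i] else d.getD w [] := by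
  induction S with
  | nil => intro d w _; simp
  | cons v rest ih =>
    intro d w hS
    simp only [List.foldl_cons]
    rw [ih _ w (List.nodup_cons.mp hS).2, PySem.Dict.getD_modify]
    by_cases hw : w = v
    · subst hw
      have hnr : w ∉ rest := (List.nodup_cons.mp hS).1
      simp [hnr]
    · by_cases hr : w ∈ rest <;> simp [hw, hr]

-- outer loop of B: incidence[w] is the list of indices of triangles containing w
theorem pvOuterInc (ts : List (List Int)) (w : Int) :
    ∀ (s : Int) (d : PySem.Dict Int (List Int)),
      ((PySem.List.enumerate ts s).foldl (fun d p =>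
          (PySem.Set.ofList p.2).foldl (fun d v => d.modify v [] (fun l => l ++ [p.1])) d)
          d).getD w []
        = d.getD w [] ++ ((PySem.List.enumerate ts s).filter (fun p => p.2.contains w)).map (·.1) := by
  induction ts with
  | nil => intro s d; simp [PySem.List.enumerate]
  | cons t rest ih =>
    intro s d
    rw [PySem.List.enumerate_cons]
    simp only [List.foldl_cons, List.filter_cons]
    rw [ih (s + 1), pvInnerInc (PySem.Set.ofList t) s d w (PySem.Set.nodup_ofList t)]
    by_cases hw : w ∈ t
    · rw [if_pos ((PySem.Set.mem_ofList _ _).mpr hw)]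
      simp [hw, List.append_assoc]
    · rw [if_neg (fun hmem => hw ((PySem.Set.mem_ofList _ _).mp hmem))]
      simp [hw]

-- intersecting the two fst-projections of filters of a fst-Nodup list
theorem pvInterFilter (l : List (Int × List Int)) (a b : Int)
    (hl : (l.map Prod.fst).Nodup) :
    PySem.Set.inter ((l.filter (fun p => p.2.contains a)).map (·.1))
        ((l.filter (fun p => p.2.contains b)).map (·.1)) =
      (l.filter (fun p => p.2.contains a && p.2.contains b)).map (·.1) := by
  induction l with
  | nil => rfl
  | cons p rest ih =>
    simp only [List.map_cons, List.nodup_cons] at hl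
    obtain ⟨hp, hrest⟩ := hl
    have htail := ih hrest
    have hAne : ∀ x ∈ (rest.filter (fun p => p.2.contains a)).map (fun x => x.1), x ≠ p.1 := by
      intro x hx hc
      subst hc
      apply hp
      simp only [List.mem_map] at hx ⊢
      obtain ⟨q, hq, hq1⟩ := hx
      exact ⟨q, List.mem_of_mem_filter hq, hq1⟩
    have hBne : p.1 ∉ (rest.filter (fun p => p.2.contains b)).map (fun x => x.1) := by
      intro hx
      apply hp
      simp only [List.mem_map] at hx ⊢
      obtain ⟨q, hq, hq1⟩ := hx
      exact ⟨q, List.mem_of_mem_filter hq, hq1⟩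
    simp only [PySem.Set.inter] at htail ⊢
    simp only [List.filter_cons]
    by_cases ha : p.2.contains a = true <;> by_cases hb : p.2.contains b = true
    · simp only [ha, hb, Bool.and_self, if_pos, List.map_cons, List.filter_cons]
      have hhead : PySem.Set.contains
          (p.1 :: (rest.filter (fun p => p.2.contains b)).map (fun x => x.1)) p.1 = true := by
        simp [PySem.Set.contains]
      rw [hhead]
      simp only [if_pos]
      congr 1
      rw [← htail]
      apply List.filter_congr
      intro x hx
      have hne := hAne x hx
      simp [PySem.Set.contains, hne]
    · simp only [ha, hb, Bool.and_false, if_pos, if_neg, Bool.false_eq_true, not_false_eq_true,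
        List.map_cons, List.filter_cons]
      have hhead : PySem.Set.contains
          ((rest.filter (fun p => p.2.contains b)).map (fun x => x.1)) p.1 = false := by
        simpa [PySem.Set.contains] using hBne
      rw [hhead]
      simpa using htail
    · simp only [ha, hb, Bool.false_and, if_pos, if_neg, Bool.false_eq_true, not_false_eq_true,
        List.map_cons]
      rw [← htail]
      apply List.filter_congr
      intro x hx
      have hne := hAne x hx
      simp [PySem.Set.contains, hne]
    · simp only [ha, hb, Bool.false_and, if_neg, Bool.false_eq_true, not_false_eq_true]
      exact htail

-- per-edge equality: B's index-list intersection size is A's rescan count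
theorem pvSharedCount (ts : List (List Int)) (a b : Int) :
    PySem.Set.len (PySem.Set.inter
        (PySem.Set.ofList
          (((PySem.List.enumerate ts 0).foldl (fun d p =>
              (PySem.Set.ofList p.2).foldl (fun d v => d.modify v [] (fun l => l ++ [p.1])) d)
              (PySem.Dict.empty : PySem.Dict Int (List Int))).getD a []))
        (PySem.Set.ofList
          (((PySem.List.enumerate ts 0).foldl (fun d p =>
              (PySem.Set.ofList p.2).foldl (fun d v => d.modify v [] (fun l => l ++ [p.1])) d)
              (PySem.Dict.empty : PySem.Dict Int (List Int))).getD b [])))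
      = (ts.filter (fun t => t.contains a && t.contains b)).length := by
  have hchar : ∀ w : Int,
      ((PySem.List.enumerate ts 0).foldl (fun d p =>
          (PySem.Set.ofList p.2).foldl (fun d v => d.modify v [] (fun l => l ++ [p.1])) d)
          (PySem.Dict.empty : PySem.Dict Int (List Int))).getD w []
        = ((PySem.List.enumerate ts 0).filter (fun p => p.2.contains w)).map (·.1) := by
    intro w
    rw [pvOuterInc ts w 0]
    simp [PySem.Dict.getD_empty]
  have hfstnd : ((PySem.List.enumerate ts 0).map Prod.fst).Nodup := by
    rw [PySem.List.map_fst_enumerate]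
    exact PySem.List.nodup_pyRange_one 0 (0 + ts.length)
  have hnd : ∀ w : Int,
      (((PySem.List.enumerate ts 0).filter (fun p => p.2.contains w)).map (·.1)).Nodup := by
    intro w
    exact hfstnd.sublist (List.Sublist.map Prod.fst List.filter_sublist)
  rw [hchar a, hchar b, PySem.Set.ofList_eq_self_of_nodup _ (hnd a),
    PySem.Set.ofList_eq_self_of_nodup _ (hnd b), pvInterFilter _ a b hfstnd]
  have hsnd : ts.filter (fun t => t.contains a && t.contains b) =
      ((PySem.List.enumerate ts 0).filter (fun p => p.2.contains a && p.2.contains b)).map (·.2) := by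
    conv_lhs => rw [← PySem.List.map_snd_enumerate ts 0]
    rw [List.filter_map]
    rfl
  rw [hsnd]
  simp [PySem.Set.len]

-- under Pre_, A's three edges of a triangle are exactly pvTriEdges
theorem pvEdgeA_eval (x y z : Int) (r : List Int) (es : PySem.Set (Int × Int)) :
    (PySem.List.pyRange 0 3 1).foldl (fun es i => PySem.Set.add es (pvEdgeA (x :: y :: z :: r) i)) es
      = (pvTriEdges (x :: y :: z :: r)).foldl PySem.Set.add es := by
  have c0 : (0:Int) ≤ (r.length:Int) + 1 + 1 := by positivity
  have c1 : (0:Int) ≤ (r.length:Int) + 1 := by positivity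
  have c2 : (2:Int) ≤ (r.length:Int) + 1 + 1 := by
    have : (0:Int) ≤ (r.length:Int) := Int.natCast_nonneg _
    omega
  have g0 : PySem.List.pyGet? (x :: y :: z :: r) 0 = some x := by
    simp [PySem.List.pyGet?, PySem.List.pyIdx?, c0]
  have g1 : PySem.List.pyGet? (x :: y :: z :: r) 1 = some y := by
    simp [PySem.List.pyGet?, PySem.List.pyIdx?, c1]
  have g2 : PySem.List.pyGet? (x :: y :: z :: r) 2 = some z := by
    simp [PySem.List.pyGet?, PySem.List.pyIdx?, c2]
  have m0 : PySem.Int.mod (0 + 1) 3 = 1 := by decide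
  have m1 : PySem.Int.mod (1 + 1) 3 = 2 := by decide
  have m2 : PySem.Int.mod (2 + 1) 3 = 0 := by decide
  have hr : PySem.List.pyRange 0 3 1 = [0, 1, 2] := by decide
  rw [hr]
  simp only [List.foldl_cons, List.foldl_nil, pvTriEdges, pvEdgeA, m0, m1, m2,
    g0, g1, g2, Option.getD_some]

-- under Pre_, A's edge set is set(edge_list) of B
theorem edges_eq (ts : List (List Int)) (hpre : ∀ t ∈ ts, 3 ≤ t.length) :
    ts.foldl (fun es t =>
        (PySem.List.pyRange 0 3 1).foldl (fun es i => PySem.Set.add es (pvEdgeA t i)) es)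
      ([] : PySem.Set (Int × Int))
      = PySem.Set.ofList (ts.foldl (fun es t => es ++ pvTriEdges t) []) := by
  rw [PySem.List.foldl_append_eq_flatMap, List.nil_append, PySem.Set.ofList_eq_foldl,
    List.foldl_flatMap]
  refine PySem.List.foldl_congr_mem _ _ _ _ ?_
  intro es t ht
  have h3 := hpre t ht
  match t with
  | [] => simp at h3
  | [_] => simp at h3
  | [_, _] => simp at h3
  | x :: y :: z :: r => exact pvEdgeA_eval x y z r es

-- ===== VERDICT (by name: the statement is the Claim_ definition above) =====
theorem count_bad_orientations_spec : Claim_equal_count_bad_orientations := by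
  intro vertices triangles _ hpre
  unfold Spec_count_bad_orientations count_bad_orientations count_bad_orientations_alt
  dsimp only
  rw [edges_eq triangles hpre]
  rw [PySem.List.foldl_ite_add_one
    (p := fun e : Int × Int =>
      ((triangles.filter (fun t => t.contains e.1 && t.contains e.2)).length : Int) ≠ 2)]
  rw [PySem.List.foldl_ite_add_one
    (p := fun e : Int × Int =>
      (PySem.Set.len (PySem.Set.inter
          (PySem.Set.ofList
            (((PySem.List.enumerate triangles 0).foldl (fun d p =>
                (PySem.Set.ofList p.2).foldl (fun d v => d.modify v [] (fun l => l ++ [p.1])) d)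
                (PySem.Dict.empty : PySem.Dict Int (List Int))).getD e.1 []))
          (PySem.Set.ofList
            (((PySem.List.enumerate triangles 0).foldl (fun d p =>
                (PySem.Set.ofList p.2).foldl (fun d v => d.modify v [] (fun l => l ++ [p.1])) d)
                (PySem.Dict.empty : PySem.Dict Int (List Int))).getD e.2 []))) : Int) ≠ 2)]
  have hc : List.countP
      (fun e : Int × Int =>
        decide (((triangles.filter (fun t => t.contains e.1 && t.contains e.2)).length : Int) ≠ 2))
      (PySem.Set.ofList (triangles.foldl (fun es t => es ++ pvTriEdges t) []))
      = List.countP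
      (fun e : Int × Int =>
        decide ((PySem.Set.len (PySem.Set.inter
            (PySem.Set.ofList
              (((PySem.List.enumerate triangles 0).foldl (fun d p =>
                  (PySem.Set.ofList p.2).foldl (fun d v => d.modify v [] (fun l => l ++ [p.1])) d)
                  (PySem.Dict.empty : PySem.Dict Int (List Int))).getD e.1 []))
            (PySem.Set.ofList
              (((PySem.List.enumerate triangles 0).foldl (fun d p =>
                  (PySem.Set.ofList p.2).foldl (fun d v => d.modify v [] (fun l => l ++ [p.1])) d)
                  (PySem.Dict.empty : PySem.Dict Int (List Int))).getD e.2 []))) : Int) ≠ 2))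
      (PySem.Set.ofList (triangles.foldl (fun es t => es ++ pvTriEdges t) [])) := by
    refine List.countP_congr ?_
    intro e _
    simp only [decide_eq_true_eq, pvSharedCount triangles e.1 e.2]
  rw [hc]
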